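-- pv_equiv track=rewrite | github.com/cdjasonj/-NER_BILSTM_SELFATT_CRF | inputs/MSAR/data_process.py | get_bichar
-- ===== SOURCE A (Python) =====
-- def get_bichar(text):
--     """
--     w1,w2,w3,w4,w5,w6,w7
--     bichar : w1w2,w2w3,w4w5,w5w6,w7w0
--     :param text:
--     :return:
--     """
--     new_text = []
--     for index,char in enumerate(text):
--         if index != len(text) - 1:  #没有达到最后一个
--             new_text.append(char+text[index+1])
--         else:
--             new_text.append(char+'$')
--     return new_text
-- ===== SOURCE B (Python) =====
-- def get_bichar(text):
--     out = []
--     nxt = '$'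
--     for ch in reversed(text):
--         out.append(ch + nxt)
--         nxt = ch
--     out.reverse()
--     return out
-- ===== Notes on version B (the rewrite author's own statement) =====
-- stated objective: alternative
-- what changed: Traverses the text back-to-front carrying the successor character in an accumulator (initialised to '$'), building the result in reverse with no per-index string lookup and no last-element branch, then reverses it once at the end.
import Mathlib
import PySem

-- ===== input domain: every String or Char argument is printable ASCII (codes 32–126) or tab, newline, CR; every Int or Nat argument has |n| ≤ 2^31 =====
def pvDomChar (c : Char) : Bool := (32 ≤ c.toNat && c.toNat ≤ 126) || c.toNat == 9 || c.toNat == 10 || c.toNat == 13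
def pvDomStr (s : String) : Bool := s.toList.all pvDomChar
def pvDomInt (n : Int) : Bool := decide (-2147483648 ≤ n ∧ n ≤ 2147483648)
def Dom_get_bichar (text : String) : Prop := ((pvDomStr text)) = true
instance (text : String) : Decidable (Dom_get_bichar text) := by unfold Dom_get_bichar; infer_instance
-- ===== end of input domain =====

-- B traverses the text back-to-front carrying the successor character ('$' initially); same values, different decomposition.

-- ===== PORT A =====
-- getD '?' totalizes text[index+1]; the branch guarantees index+1 is in range, so it is exact there.
def get_bichar (text : String) : List String :=
  (PySem.List.enumerate text.toList 0).foldl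
    (fun acc p =>
      if p.1 ≠ (text.toList.length : Int) - 1 then
        acc ++ [String.ofList [p.2, (PySem.Str.pyGet? text (p.1 + 1)).getD '?']]
      else
        acc ++ [String.ofList [p.2, '$']]) []

-- ===== PORT B =====
-- fold over the reversed character list with state (out, nxt); out is appended in processing
-- order (as Python list.append does) and reversed once at the end, as in Source B.
def get_bichar_alt (text : String) : List String :=
  (text.toList.reverse.foldl
    (fun (st : List String × Char) ch => (st.1 ++ [String.ofList [ch, st.2]], ch))
    ([], '$')).1.reverse

-- ===== PRECONDITION & SPEC =====
def Spec_get_bichar (text : String) (out : List String) : Prop := out = get_bichar_alt text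
instance (text : String) (out : List String) : Decidable (Spec_get_bichar text out) := by unfold Spec_get_bichar; infer_instance

-- ===== CLAIM (what is proved, stated in full; the proofs are below) =====
def Claim_equal_get_bichar : Prop := ∀ (text : String), Dom_get_bichar text → Spec_get_bichar text (get_bichar text)

-- ===== LEMMAS AND PROOFS =====

-- Both sides equal the zipWith of the text with its tail padded by '$'.
theorem get_bichar_eq_zipWith (text : String) :
    get_bichar text =
      List.zipWith (fun a b => String.ofList [a, b]) text.toList (text.toList.tail ++ ['$']) := by
  unfold get_bichar
  have hfun : (fun (acc : List String) (p : Int × Char) =>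
      if p.1 ≠ (text.toList.length : Int) - 1 then
        acc ++ [String.ofList [p.2, (PySem.Str.pyGet? text (p.1 + 1)).getD '?']]
      else
        acc ++ [String.ofList [p.2, '$']]) =
      (fun acc p => acc ++ [if p.1 ≠ (text.toList.length : Int) - 1 then
        String.ofList [p.2, (PySem.Str.pyGet? text (p.1 + 1)).getD '?']
        else String.ofList [p.2, '$']]) := by
    funext acc p; split <;> rfl
  rw [hfun, PySem.List.foldl_append_singleton_eq_map, List.nil_append]
  set l := text.toList with hl
  apply List.ext_getElem
  · simp [PySem.List.length_enumerate]
    omega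
  · intro i h1 h2
    have hn : i < l.length := by
      simpa [PySem.List.length_enumerate] using h1
    rw [List.getElem_map, PySem.List.getElem_enumerate, List.getElem_zipWith]
    have htail : l.tail.length = l.length - 1 := List.length_tail ..
    by_cases hlast : i = l.length - 1
    · have hcond : ¬ ((0 + (i : Int)) ≠ (l.length : Int) - 1) := by
        simp; omega
      rw [if_neg hcond]
      have hlen : i < (l.tail ++ ['$']).length := by simp [htail]; omega
      have : (l.tail ++ ['$'])[i]'hlen = '$' := by
        rw [List.getElem_append_right (by omega)]
        simp [htail, hlast]
      rw [this]
    · have hcond : ((0 + (i : Int)) ≠ (l.length : Int) - 1) := by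
        simp; omega
      rw [if_pos hcond]
      have hlen : i < (l.tail ++ ['$']).length := by simp [htail]; omega
      have hget : (l.tail ++ ['$'])[i]'hlen = l[i + 1]'(by omega) := by
        rw [List.getElem_append_left (by omega)]
        exact List.getElem_tail ..
      rw [hget]
      have : PySem.Str.pyGet? text (0 + (i : Int) + 1) = some l[i + 1] := by
        have : (0 + (i : Int) + 1) = ((i + 1 : Nat) : Int) := by push_cast; ring
        rw [this, PySem.Str.pyGet?_natCast, ← hl, List.getElem?_eq_getElem (by omega)]
      rw [this]
      rfl

-- Invariant of B's backward fold: after consuming l.reverse, out holds the bigram list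
-- of l in reverse, and nxt is l's first character (or '$' for empty l).
theorem altFold (l : List Char) :
    l.reverse.foldl
      (fun (st : List String × Char) ch => (st.1 ++ [String.ofList [ch, st.2]], ch))
      ([], '$') =
    ((List.zipWith (fun a b => String.ofList [a, b]) l (l.tail ++ ['$'])).reverse,
      l.headD '$') := by
  induction l with
  | nil => rfl
  | cons a tl ih =>
    rw [List.reverse_cons, List.foldl_append, ih]
    cases tl with
    | nil => rfl
    | cons b r => simp

-- ===== VERDICT (by name: the statement is the Claim_ definition above) =====
theorem get_bichar_spec : Claim_equal_get_bichar := by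
  intro text _
  unfold Spec_get_bichar get_bichar_alt
  rw [get_bichar_eq_zipWith, altFold, List.reverse_reverse]
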